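-- pv_equiv track=rewrite | github.com/spicy-biscuit/Sandbox | Python/AOC/2015/11-P2.py | RequirementThree
-- ===== SOURCE A (Python) =====
-- def RequirementThree(Password):
--   PairIndexes = []
--   for x in range(len(Password) - 1):
--     if Password[x] == Password[x + 1]:
--       PairIndexes.append(x)
--   for x in PairIndexes:
--     for y in PairIndexes:
--       if y not in [x - 1, x, x + 1]:
--         return(True)
--   return(False)
-- ===== SOURCE B (Python) =====
-- def RequirementThree(Password):
--     first = None
--     for i in range(len(Password) - 1):
--         if Password[i] == Password[i + 1]:
--             if first is None:
--                 first = i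
--             elif i >= first + 2:
--                 return True
--     return False
-- ===== Notes on version B (the rewrite author's own statement) =====
-- stated objective: faster
-- what changed: B replaces A's collect-all-pair-indexes-then-quadratic-double-scan with a single pass that remembers only the first adjacent-pair index and returns True as soon as a later pair index is at least 2 beyond it.
import Mathlib
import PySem

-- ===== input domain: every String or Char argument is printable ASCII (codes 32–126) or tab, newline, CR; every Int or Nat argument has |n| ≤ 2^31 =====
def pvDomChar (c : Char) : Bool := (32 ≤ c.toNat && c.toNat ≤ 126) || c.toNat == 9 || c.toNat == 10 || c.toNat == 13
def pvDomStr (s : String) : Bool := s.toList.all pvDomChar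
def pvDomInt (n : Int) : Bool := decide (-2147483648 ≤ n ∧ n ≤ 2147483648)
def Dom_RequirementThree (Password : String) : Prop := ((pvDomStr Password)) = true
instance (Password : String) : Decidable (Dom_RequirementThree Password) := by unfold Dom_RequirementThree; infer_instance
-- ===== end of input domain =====

-- B replaces A's collect-all-pairs-then-quadratic-double-scan by one pass that keeps only the
-- first adjacent-pair index and answers True at the first later pair index ≥ first+2 (faster: O(n) vs O(n^2)).

-- ===== PORT A =====
def RequirementThree (Password : String) : Bool :=
  let chars := Password.toList
  let pairIndexes : List Int :=
    (PySem.List.pyRange 0 (PySem.Str.len Password - 1) 1).foldl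
      (fun acc x =>
        if PySem.List.pyGet? chars x == PySem.List.pyGet? chars (x + 1) then acc ++ [x] else acc) []
  pairIndexes.any (fun x =>
    pairIndexes.any (fun y => !(y == x - 1 || y == x || y == x + 1)))

-- ===== PORT B =====
-- one pass over the indexes; `first` is the first adjacent-pair index seen so far
def pvAltLoop (chars : List Char) : List Int → Option Int → Bool
  | [], _ => false
  | i :: rest, first =>
    if PySem.List.pyGet? chars i == PySem.List.pyGet? chars (i + 1) then
      match first with
      | none => pvAltLoop chars rest (some i)
      | some f => if f + 2 ≤ i then true else pvAltLoop chars rest (some f)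
    else pvAltLoop chars rest first

def RequirementThree_alt (Password : String) : Bool :=
  pvAltLoop Password.toList (PySem.List.pyRange 0 (PySem.Str.len Password - 1) 1) none

-- ===== PRECONDITION & SPEC =====
def Spec_RequirementThree (Password : String) (out : Bool) : Prop := out = RequirementThree_alt Password
instance (Password : String) (out : Bool) : Decidable (Spec_RequirementThree Password out) := by unfold Spec_RequirementThree; infer_instance

-- ===== CLAIM (what is proved, stated in full; the proofs are below) =====
def Claim_equal_RequirementThree : Prop := ∀ (Password : String), Dom_RequirementThree Password → Spec_RequirementThree Password (RequirementThree Password)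

-- ===== LEMMAS AND PROOFS =====

-- B's loop in state (some f) answers: is there a remaining pair index ≥ f+2
theorem pvAltLoop_some (chars : List Char) (idxs : List Int) (f : Int) :
    pvAltLoop chars idxs (some f)
      = (idxs.filter (fun i => PySem.List.pyGet? chars i == PySem.List.pyGet? chars (i + 1))).any
          (fun j => decide (f + 2 ≤ j)) := by
  induction idxs with
  | nil => simp [pvAltLoop]
  | cons i rest ih =>
    by_cases h : PySem.List.pyGet? chars i == PySem.List.pyGet? chars (i + 1)
    · by_cases h2 : f + 2 ≤ i <;> simp [pvAltLoop, h, h2, ih]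
    · simp [pvAltLoop, h, ih]

-- B's loop from the empty state, phrased on the filtered pair-index list
theorem pvAltLoop_none (chars : List Char) (idxs : List Int) :
    pvAltLoop chars idxs none
      = (match idxs.filter (fun i => PySem.List.pyGet? chars i == PySem.List.pyGet? chars (i + 1)) with
          | [] => false
          | f :: rest => rest.any (fun j => decide (f + 2 ≤ j))) := by
  induction idxs with
  | nil => simp [pvAltLoop]
  | cons i rest ih =>
    by_cases h : PySem.List.pyGet? chars i == PySem.List.pyGet? chars (i + 1)
    · simp [pvAltLoop, h, pvAltLoop_some]
    · simp [pvAltLoop, h, ih]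

-- on a strictly increasing pair-index list, A's double scan equals B's first-vs-later check
theorem pvMain (f : Int) (rest : List Int) (h : (f :: rest).Pairwise (· < ·)) :
    ((f :: rest).any (fun x => (f :: rest).any (fun y => !(y == x - 1 || y == x || y == x + 1))))
      = rest.any (fun j => decide (f + 2 ≤ j)) := by
  have hf : ∀ z ∈ rest, f < z := (List.pairwise_cons.mp h).1
  apply Bool.eq_iff_iff.mpr
  simp only [List.any_eq_true, List.mem_cons, Bool.not_eq_eq_eq_not, Bool.not_true,
    Bool.or_eq_false_iff, beq_eq_false_iff_ne, ne_eq, decide_eq_true_eq]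
  constructor
  · rintro ⟨x, hx, y, hy, ⟨h1, h2⟩, h3⟩
    rcases hx with rfl | hx <;> rcases hy with rfl | hy
    · omega
    · exact ⟨y, hy, by have := hf y hy; omega⟩
    · exact ⟨x, hx, by have := hf x hx; omega⟩
    · have hxf := hf x hx
      have hyf := hf y hy
      by_cases hxy : x ≤ y
      · exact ⟨y, hy, by omega⟩
      · exact ⟨x, hx, by omega⟩
  · rintro ⟨j, hj, hge⟩
    exact ⟨f, Or.inl rfl, j, Or.inr hj, ⟨by omega, by omega⟩, by omega⟩

-- ===== VERDICT (by name: the statement is the Claim_ definition above) =====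
theorem RequirementThree_spec : Claim_equal_RequirementThree := by
  intro Password _
  unfold Spec_RequirementThree RequirementThree RequirementThree_alt
  rw [pvAltLoop_none]
  simp only [PySem.List.foldl_append_if_eq_filter, List.nil_append]
  have hs : ((PySem.List.pyRange 0 (PySem.Str.len Password - 1) 1).filter
      (fun i => PySem.List.pyGet? Password.toList i == PySem.List.pyGet? Password.toList (i + 1))).Pairwise (· < ·) :=
    (PySem.List.pairwise_lt_pyRange_one 0 (PySem.Str.len Password - 1)).filter _
  cases hpl : (PySem.List.pyRange 0 (PySem.Str.len Password - 1) 1).filter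
      (fun i => PySem.List.pyGet? Password.toList i == PySem.List.pyGet? Password.toList (i + 1)) with
  | nil => simp
  | cons f rest => exact pvMain f rest (hpl ▸ hs)
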